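-- pv_equiv track=rewrite | github.com/huawei-csl/sprout-hdl | sprouthdl/arithmetic/prefix_adders/prefix_adder.py | P_to_matrix
-- ===== SOURCE A (Python) =====
-- from typing import Any, Dict, List, Set, Tuple, Iterable, Optional, TypeAlias
--
-- Pair = Tuple[int, int]
--
-- def P_to_matrix(n: int, nodes: Iterable[Pair]) -> List[List[int]]:
--     """(Optional) helper to render a set of pairs into an n×n 0/1 matrix (for printing/debug)."""
--     M = [[0] * n for _ in range(n)]
--     for i, j in nodes:
--         if 0 <= j <= i < n and i != j:
--             M[i][j] = 1
--     for i in range(n):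
--         M[i][i] = 1  # leaves shown as 1 for readability (not required by builder)
--     return M
-- ===== SOURCE B (Python) =====
-- from typing import Iterable, List, Tuple
--
-- Pair = Tuple[int, int]
--
-- def P_to_matrix(n: int, nodes: Iterable[Pair]) -> List[List[int]]:
--     # Group the valid pairs by row once, then build each row sparsely:
--     # sort that row's column indices (plus the diagonal) and emit the row as
--     # zero-runs between consecutive one-positions (run-length gap fill),
--     # instead of allocating a dense zero matrix and scatter-writing into it.
--     rows = {}
--     for i, j in nodes:
--         if 0 <= j <= i < n and i != j:
--             rows.setdefault(i, []).append(j)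
--     M = []
--     for i in range(n):
--         cols = sorted({i, *rows.get(i, [])})
--         row = []
--         prev = -1
--         for c in cols:
--             row += [0] * (c - prev - 1)
--             row.append(1)
--             prev = c
--         row += [0] * (n - 1 - prev)
--         M.append(row)
--     return M
-- ===== Notes on version B (the rewrite author's own statement) =====
-- stated objective: alternative
-- what changed: Instead of allocating a dense zero matrix and scatter-writing 1s then fixing the diagonal, B groups the valid pairs by row into a dict once, and builds each row sparsely by sorting that row's column indices (plus the diagonal) and emitting zero-runs between consecutive one-positions (run-length gap fill).
import Mathlib
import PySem

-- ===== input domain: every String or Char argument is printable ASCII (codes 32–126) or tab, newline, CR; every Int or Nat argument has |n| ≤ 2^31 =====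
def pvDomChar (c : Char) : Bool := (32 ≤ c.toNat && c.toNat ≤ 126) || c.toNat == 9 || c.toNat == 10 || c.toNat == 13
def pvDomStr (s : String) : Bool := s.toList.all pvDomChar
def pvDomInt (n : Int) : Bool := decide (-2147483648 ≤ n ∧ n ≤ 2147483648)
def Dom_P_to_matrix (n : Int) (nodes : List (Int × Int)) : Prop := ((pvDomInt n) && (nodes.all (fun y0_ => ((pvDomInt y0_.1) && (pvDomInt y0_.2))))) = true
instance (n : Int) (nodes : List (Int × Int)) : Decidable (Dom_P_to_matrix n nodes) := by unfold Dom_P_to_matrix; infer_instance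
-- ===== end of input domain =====

-- B replaces A's dense zero matrix + scatter-writes + diagonal fix-up by a per-row grouping
-- dict and a sparse run-length gap-fill of each row from its sorted column indices (alternative; not faster).

-- ===== PORT A =====
-- body of A's node loop: conditional in-place write M[i][j] = 1
def pvStepA (n : Int) (M : List (List Int)) (p : Int × Int) : List (List Int) :=
  if 0 ≤ p.2 ∧ p.2 ≤ p.1 ∧ p.1 < n ∧ p.1 ≠ p.2 then
    M.set p.1.toNat ((M.getD p.1.toNat []).set p.2.toNat 1)
  else M

-- body of A's diagonal loop: M[i][i] = 1
def pvDiagA (M : List (List Int)) (i : Nat) : List (List Int) :=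
  M.set i ((M.getD i []).set i 1)

def P_to_matrix (n : Int) (nodes : List (Int × Int)) : List (List Int) :=
  -- M = [[0] * n for _ in range(n)]  (empty for n ≤ 0, hence toNat)
  (List.range n.toNat).foldl pvDiagA
    (nodes.foldl (pvStepA n)
      ((List.range n.toNat).map (fun _ => List.replicate n.toNat (0 : Int))))

-- ===== PORT B =====
-- rows = {}; for i, j in nodes: if valid: rows.setdefault(i, []).append(j)
def pvRowsB (n : Int) (nodes : List (Int × Int)) : PySem.Dict Int (List Int) :=
  nodes.foldl (fun d p =>
    if 0 ≤ p.2 ∧ p.2 ≤ p.1 ∧ p.1 < n ∧ p.1 ≠ p.2 then d.modify p.1 [] (· ++ [p.2]) else d)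
    PySem.Dict.empty

-- row = []; prev = -1
-- for c in cols: row += [0] * (c - prev - 1); row.append(1); prev = c
-- row += [0] * (n - 1 - prev)
def pvGapRowB (n : Int) (cols : List Int) : List Int :=
  let st := cols.foldl
    (fun (st : List Int × Int) c => (st.1 ++ List.replicate (c - st.2 - 1).toNat 0 ++ [1], c))
    ([], -1)
  st.1 ++ List.replicate (n - 1 - st.2).toNat 0

def P_to_matrix_alt (n : Int) (nodes : List (Int × Int)) : List (List Int) :=
  let rows := pvRowsB n nodes
  -- M = []; for i in range(n): cols = sorted({i, *rows.get(i, [])}); …gap fill…; M.append(row)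
  (PySem.List.pyRange 0 n 1).foldl
    (fun M i =>
      M ++ [pvGapRowB n (PySem.List.sorted (PySem.Set.ofList (i :: rows.getD i [])) (fun x => x) false)])
    []

-- ===== PRECONDITION & SPEC =====
def Spec_P_to_matrix (n : Int) (nodes : List (Int × Int)) (out : List (List Int)) : Prop := out = P_to_matrix_alt n nodes
instance (n : Int) (nodes : List (Int × Int)) (out : List (List Int)) : Decidable (Spec_P_to_matrix n nodes out) := by unfold Spec_P_to_matrix; infer_instance

-- ===== CLAIM (what is proved, stated in full; the proofs are below) =====
def Claim_equal_P_to_matrix : Prop := ∀ (n : Int) (nodes : List (Int × Int)), Dom_P_to_matrix n nodes → Spec_P_to_matrix n nodes (P_to_matrix n nodes)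

-- ===== LEMMAS AND PROOFS =====

-- reading cell (i, j) with default 0 outside the matrix
def pvGet2 (M : List (List Int)) (i j : Nat) : Int := (M.getD i []).getD j 0

-- the write/keep condition shared by both programs
abbrev pvC (n : Int) (p : Int × Int) : Prop := 0 ≤ p.2 ∧ p.2 ≤ p.1 ∧ p.1 < n ∧ p.1 ≠ p.2

-- ---------- A side: cell-level characterisation ----------

lemma pvStepA_eq (n : Int) (M : List (List Int)) (p : Int × Int) :
    pvStepA n M p = if pvC n p then M.set p.1.toNat ((M.getD p.1.toNat []).set p.2.toNat 1) else M := rfl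

lemma pvStepA_length (n : Int) (M : List (List Int)) (p : Int × Int) :
    (pvStepA n M p).length = M.length := by
  rw [pvStepA_eq]; split <;> simp

lemma pvStepA_rows (n : Int) (M : List (List Int)) (p : Int × Int) (m : Nat)
    (hrow : ∀ r ∈ M, r.length = m) : ∀ r ∈ pvStepA n M p, r.length = m := by
  rw [pvStepA_eq]; split
  · intro r hr
    by_cases ha : p.1.toNat < M.length
    · rcases List.mem_or_eq_of_mem_set hr with h | h
      · exact hrow r h
      · subst h
        simp only [List.length_set]
        exact hrow _ (by rw [List.getD_eq_getElem _ _ ha]; exact List.getElem_mem _)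
    · rw [List.set_eq_of_length_le (by omega)] at hr
      exact hrow r hr
  · exact fun r hr => hrow r hr

lemma pvGet2_set (M : List (List Int)) (a b i j : Nat) (ha : a < M.length) :
    pvGet2 (M.set a ((M.getD a []).set b 1)) i j =
      if i = a ∧ j = b ∧ b < (M.getD a []).length then 1 else pvGet2 M i j := by
  unfold pvGet2
  by_cases hia : i = a
  · subst hia
    have h1 : (M.set i ((M.getD i []).set b 1)).getD i [] = (M.getD i []).set b 1 := by
      rw [List.getD_eq_getElem _ _ (by simpa using ha), List.getElem_set_self]
    rw [h1]
    by_cases hb : b < (M.getD i []).length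
    · by_cases hjb : j = b
      · subst hjb
        rw [if_pos ⟨rfl, rfl, hb⟩, List.getD_eq_getElem _ _ (by simpa using hb), List.getElem_set_self]
      · rw [if_neg (by tauto)]
        by_cases hj : j < (M.getD i []).length
        · rw [List.getD_eq_getElem _ _ (by simpa using hj), List.getElem_set_ne (by omega),
            List.getD_eq_getElem _ _ hj]
        · rw [List.getD_eq_default _ _ (by rw [List.length_set]; omega), List.getD_eq_default _ _ (by omega)]
    · rw [if_neg (by tauto), List.set_eq_of_length_le (by omega)]
  · rw [if_neg (by tauto)]
    have h1 : (M.set a ((M.getD a []).set b 1)).getD i [] = M.getD i [] := by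
      by_cases hi : i < M.length
      · rw [List.getD_eq_getElem _ _ (by simpa using hi), List.getElem_set_ne (by omega),
          List.getD_eq_getElem _ _ hi]
      · have e1 : (M.set a ((M.getD a []).set b 1)).getD i [] = [] :=
          List.getD_eq_default _ _ (by rw [List.length_set]; omega)
        have e2 : M.getD i [] = ([] : List Int) := List.getD_eq_default _ _ (by omega)
        rw [e1, e2]
    rw [h1]

lemma pvStepA_get2 (n : Int) (M : List (List Int)) (p : Int × Int)
    (hlen : M.length = n.toNat) (hrow : ∀ r ∈ M, r.length = n.toNat) (i j : Nat) :
    pvGet2 (pvStepA n M p) i j =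
      if pvC n p ∧ p = ((i : Int), (j : Int)) then 1 else pvGet2 M i j := by
  rw [pvStepA_eq]
  by_cases hc : pvC n p
  · rw [if_pos hc]
    obtain ⟨a, b⟩ := p
    obtain ⟨h0, h1, h2, h3⟩ := hc
    have ha : a.toNat < M.length := by omega
    rw [pvGet2_set _ _ _ _ _ ha]
    have hrl : (M.getD a.toNat []).length = n.toNat := by
      rw [List.getD_eq_getElem _ _ ha]; exact hrow _ (List.getElem_mem _)
    rw [hrl]
    simp only [Prod.mk.injEq]
    by_cases hij : a = (i : Int) ∧ b = (j : Int)
    · rw [if_pos ⟨by omega, by omega, by omega⟩, if_pos ⟨⟨h0, h1, h2, h3⟩, hij⟩]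
    · rw [if_neg (by rintro ⟨e1, e2, e3⟩; exact hij ⟨by omega, by omega⟩),
        if_neg (by rintro ⟨_, e1, e2⟩; exact hij ⟨e1, e2⟩)]
  · rw [if_neg hc, if_neg (fun h => hc h.1)]

lemma pvFold1 (n : Int) (nodes : List (Int × Int)) :
    ∀ M : List (List Int), M.length = n.toNat → (∀ r ∈ M, r.length = n.toNat) →
    (nodes.foldl (pvStepA n) M).length = n.toNat ∧
    (∀ r ∈ nodes.foldl (pvStepA n) M, r.length = n.toNat) ∧
    (∀ i j : Nat, pvGet2 (nodes.foldl (pvStepA n) M) i j =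
      if ((i : Int), (j : Int)) ∈ nodes ∧ pvC n ((i : Int), (j : Int)) then 1 else pvGet2 M i j) := by
  induction nodes with
  | nil => intro M h1 h2; refine ⟨h1, h2, ?_⟩; intro i j; simp
  | cons p rest ih =>
    intro M h1 h2
    have h1' : (pvStepA n M p).length = n.toNat := by rw [pvStepA_length]; exact h1
    have h2' := pvStepA_rows n M p n.toNat h2
    obtain ⟨g1, g2, g3⟩ := ih (pvStepA n M p) h1' h2'
    refine ⟨g1, g2, ?_⟩
    intro i j
    simp only [List.foldl_cons]
    rw [g3 i j, pvStepA_get2 n M p h1 h2 i j]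
    by_cases hrest : ((i : Int), (j : Int)) ∈ rest ∧ pvC n ((i : Int), (j : Int))
    · rw [if_pos hrest, if_pos ⟨List.mem_cons_of_mem _ hrest.1, hrest.2⟩]
    · rw [if_neg hrest]
      by_cases hp : pvC n p ∧ p = ((i : Int), (j : Int))
      · rw [if_pos hp, if_pos ⟨hp.2 ▸ List.mem_cons_self, hp.2 ▸ hp.1⟩]
      · rw [if_neg hp, if_neg (by
          rintro ⟨hm, hcij⟩
          rcases List.mem_cons.mp hm with h | h
          · exact hp ⟨h ▸ hcij, h.symm⟩
          · exact hrest ⟨h, hcij⟩)]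

lemma pvDiagA_length (M : List (List Int)) (a : Nat) : (pvDiagA M a).length = M.length := by
  simp [pvDiagA]

lemma pvDiagA_rows (M : List (List Int)) (a m : Nat) (hrow : ∀ r ∈ M, r.length = m) :
    ∀ r ∈ pvDiagA M a, r.length = m := by
  unfold pvDiagA
  intro r hr
  by_cases ha : a < M.length
  · rcases List.mem_or_eq_of_mem_set hr with h | h
    · exact hrow r h
    · subst h
      simp only [List.length_set]
      exact hrow _ (by rw [List.getD_eq_getElem _ _ ha]; exact List.getElem_mem _)
  · rw [List.set_eq_of_length_le (by omega)] at hr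
    exact hrow r hr

lemma pvDiagA_get2 (M : List (List Int)) (a : Nat) (m : Nat)
    (hlen : M.length = m) (hrow : ∀ r ∈ M, r.length = m) (i j : Nat) :
    pvGet2 (pvDiagA M a) i j = if i = a ∧ j = a ∧ a < m then 1 else pvGet2 M i j := by
  unfold pvDiagA
  by_cases ha : a < M.length
  · rw [pvGet2_set _ _ _ _ _ ha]
    have hrl : (M.getD a []).length = m := by
      rw [List.getD_eq_getElem _ _ ha]; exact hrow _ (List.getElem_mem _)
    rw [hrl]
  · rw [List.set_eq_of_length_le (by omega), if_neg (by omega)]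

lemma pvFold2 (m : Nat) (l : List Nat) :
    ∀ M : List (List Int), M.length = m → (∀ r ∈ M, r.length = m) →
    (l.foldl pvDiagA M).length = m ∧
    (∀ r ∈ l.foldl pvDiagA M, r.length = m) ∧
    (∀ i j : Nat, pvGet2 (l.foldl pvDiagA M) i j =
      if i = j ∧ i ∈ l ∧ i < m then 1 else pvGet2 M i j) := by
  induction l with
  | nil => intro M h1 h2; refine ⟨h1, h2, ?_⟩; intro i j; simp
  | cons a rest ih =>
    intro M h1 h2
    have h1' : (pvDiagA M a).length = m := by rw [pvDiagA_length]; exact h1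
    have h2' := pvDiagA_rows M a m h2
    obtain ⟨g1, g2, g3⟩ := ih (pvDiagA M a) h1' h2'
    refine ⟨g1, g2, ?_⟩
    intro i j
    simp only [List.foldl_cons]
    rw [g3 i j, pvDiagA_get2 M a m h1 h2 i j]
    by_cases hrest : i = j ∧ i ∈ rest ∧ i < m
    · rw [if_pos hrest, if_pos ⟨hrest.1, List.mem_cons_of_mem _ hrest.2.1, hrest.2.2⟩]
    · rw [if_neg hrest]
      by_cases ha : i = a ∧ j = a ∧ a < m
      · rw [if_pos ha, if_pos ⟨by omega, by rw [ha.1]; exact List.mem_cons_self, by omega⟩]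
      · rw [if_neg ha, if_neg (by
          rintro ⟨hij, hm, hlt⟩
          rcases List.mem_cons.mp hm with h | h
          · exact ha ⟨h, by omega, by omega⟩
          · exact hrest ⟨hij, h, hlt⟩)]

lemma pvM0_get2 (m : Nat) (i j : Nat) :
    pvGet2 ((List.range m).map (fun _ => List.replicate m (0 : Int))) i j = 0 := by
  unfold pvGet2
  by_cases hi : i < m
  · have h1 : ((List.range m).map (fun _ => List.replicate m (0 : Int))).getD i [] = List.replicate m 0 := by
      rw [List.getD_eq_getElem _ _ (by simpa using hi)]; simp
    rw [h1]
    by_cases hj : j < m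
    · rw [List.getD_eq_getElem _ _ (by simpa using hj)]; simp
    · rw [List.getD_eq_default _ _ (by simpa using hj)]
  · have h1 : ((List.range m).map (fun _ => List.replicate m (0 : Int))).getD i [] = [] :=
      List.getD_eq_default _ _ (by simpa using hi)
    rw [h1]
    simp

-- A's result, cell by cell
lemma P_to_matrix_get2 (n : Int) (nodes : List (Int × Int)) :
    (P_to_matrix n nodes).length = n.toNat ∧
    (∀ r ∈ P_to_matrix n nodes, r.length = n.toNat) ∧
    (∀ i j : Nat, pvGet2 (P_to_matrix n nodes) i j =
      if i = j ∧ i < n.toNat then 1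
      else if ((i : Int), (j : Int)) ∈ nodes ∧ pvC n ((i : Int), (j : Int)) then 1
      else 0) := by
  have hM0len : ((List.range n.toNat).map (fun _ => List.replicate n.toNat (0 : Int))).length = n.toNat := by simp
  have hM0row : ∀ r ∈ (List.range n.toNat).map (fun _ => List.replicate n.toNat (0 : Int)), r.length = n.toNat := by
    intro r hr; simp only [List.mem_map] at hr; obtain ⟨_, _, h⟩ := hr; simp [← h]
  obtain ⟨f1, f2, f3⟩ := pvFold1 n nodes _ hM0len hM0row
  obtain ⟨g1, g2, g3⟩ := pvFold2 n.toNat (List.range n.toNat) _ f1 f2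
  refine ⟨g1, g2, ?_⟩
  intro i j
  show pvGet2 ((List.range n.toNat).foldl pvDiagA _) i j = _
  rw [g3 i j, f3 i j, pvM0_get2]
  by_cases hd : i = j ∧ i < n.toNat
  · rw [if_pos ⟨hd.1, by simpa using hd.2, hd.2⟩, if_pos hd]
  · rw [if_neg (by simp only [List.mem_range]; tauto), if_neg hd]

-- ---------- B side ----------

-- the sorted column list B builds for row i (proof-side name for the expression in the port)
def pvColsB (n : Int) (nodes : List (Int × Int)) (i : Int) : List Int :=
  PySem.List.sorted (PySem.Set.ofList (i :: (pvRowsB n nodes).getD i [])) (fun x => x) false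

lemma pvRowsB_getD (n : Int) (nodes : List (Int × Int)) (i : Int) :
    (pvRowsB n nodes).getD i [] =
      (List.filter (fun p => p.1 == i)
        (nodes.filter (fun p : Int × Int => decide (0 ≤ p.2 ∧ p.2 ≤ p.1 ∧ p.1 < n ∧ p.1 ≠ p.2)))).map (·.2) := by
  unfold pvRowsB
  rw [show (fun (d : PySem.Dict Int (List Int)) (p : Int × Int) =>
        if 0 ≤ p.2 ∧ p.2 ≤ p.1 ∧ p.1 < n ∧ p.1 ≠ p.2 then d.modify p.1 [] (· ++ [p.2]) else d)
      = (fun (d : PySem.Dict Int (List Int)) (p : Int × Int) =>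
        if (decide (0 ≤ p.2 ∧ p.2 ≤ p.1 ∧ p.1 < n ∧ p.1 ≠ p.2)) = true then d.modify p.1 [] (· ++ [p.2]) else d)
      from by funext d p; simp]
  rw [← List.foldl_filter]
  rw [PySem.Dict.getD_foldl_modify_append]
  simp

lemma pvMemCols (n : Int) (nodes : List (Int × Int)) (i x : Int) :
    x ∈ pvColsB n nodes i ↔ x = i ∨ (((i, x) ∈ nodes) ∧ pvC n (i, x)) := by
  unfold pvColsB
  rw [PySem.List.mem_sorted, PySem.Set.mem_ofList, List.mem_cons, pvRowsB_getD]
  constructor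
  · rintro (h | h)
    · left; exact h
    · right
      simp only [List.mem_map, List.mem_filter, beq_iff_eq, decide_eq_true_eq] at h
      obtain ⟨p, ⟨⟨hmem, hc⟩, hi⟩, hx⟩ := h
      obtain ⟨a, b⟩ := p
      simp only at hi hx
      subst hi; subst hx
      exact ⟨hmem, hc⟩
  · rintro (h | ⟨hmem, hc⟩)
    · left; exact h
    · right
      simp only [List.mem_map, List.mem_filter, beq_iff_eq, decide_eq_true_eq]
      exact ⟨(i, x), ⟨⟨hmem, hc⟩, rfl⟩, rfl⟩

-- the gap-fill loop over a strictly increasing, bounded column list writes exactly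
-- the membership-indicator row over range(prev+1, m)
lemma pvGapFold (m : Int) (cols : List Int) : ∀ (acc : List Int) (prev : Int),
    cols.Pairwise (· < ·) → (∀ c ∈ cols, prev < c ∧ c < m) → prev < m →
    ((cols.foldl (fun (st : List Int × Int) c => (st.1 ++ List.replicate (c - st.2 - 1).toNat 0 ++ [1], c)) (acc, prev)).1
      ++ List.replicate (m - 1 - (cols.foldl (fun (st : List Int × Int) c => (st.1 ++ List.replicate (c - st.2 - 1).toNat 0 ++ [1], c)) (acc, prev)).2).toNat 0)
      = acc ++ (PySem.List.pyRange (prev + 1) m 1).map (fun x => if x ∈ cols then 1 else 0) := by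
  induction cols with
  | nil =>
    intro acc prev _ _ hpm
    simp only [List.foldl_nil]
    rw [show (fun x : Int => if x ∈ ([] : List Int) then (1 : Int) else 0) = fun _ => (0 : Int) from by
        funext x; simp]
    rw [List.map_const', PySem.List.length_pyRange_one]
    congr 2
    omega
  | cons c rest ih =>
    intro acc prev hpw hbd hpm
    obtain ⟨hc, hcm⟩ := hbd c List.mem_cons_self
    have hgt := (List.pairwise_cons.mp hpw).1
    have hpwr := (List.pairwise_cons.mp hpw).2
    simp only [List.foldl_cons]
    rw [ih (acc ++ List.replicate (c - prev - 1).toNat 0 ++ [1]) c hpwr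
        (fun d hd => ⟨hgt d hd, (hbd d (List.mem_cons_of_mem _ hd)).2⟩) hcm]
    rw [PySem.List.pyRange_one_append (prev + 1) c m (by omega) (by omega),
        PySem.List.pyRange_one_cons hcm, List.map_append, List.map_cons]
    have h1 : (PySem.List.pyRange (prev + 1) c 1).map (fun x => if x ∈ c :: rest then (1 : Int) else 0)
        = List.replicate (c - prev - 1).toNat (0 : Int) := by
      rw [List.map_congr_left (g := fun _ => (0 : Int)) ?_, List.map_const', PySem.List.length_pyRange_one]
      · congr 1; omega
      · intro x hx
        have hxc := PySem.List.mem_pyRange_one.mp hx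
        have hnx : x ∉ c :: rest := by
          intro hmem
          rcases List.mem_cons.mp hmem with h | h
          · omega
          · exact absurd (hgt x h) (by omega)
        simp [hnx]
    have h2 : (if c ∈ c :: rest then (1 : Int) else 0) = 1 := by simp
    have h3 : (PySem.List.pyRange (c + 1) m 1).map (fun x => if x ∈ c :: rest then (1 : Int) else 0)
        = (PySem.List.pyRange (c + 1) m 1).map (fun x => if x ∈ rest then (1 : Int) else 0) := by
      apply List.map_congr_left
      intro x hx
      have hxc := PySem.List.mem_pyRange_one.mp hx
      simp [List.mem_cons, show x ≠ c from by omega]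
    rw [h1, h2, h3]
    simp [List.append_assoc]

lemma pvGapRow_eq (n : Int) (nodes : List (Int × Int)) (i : Int) (h0 : 0 ≤ i) (hn : i < n) :
    pvGapRowB n (pvColsB n nodes i)
      = (PySem.List.pyRange 0 n 1).map (fun x => if x ∈ pvColsB n nodes i then 1 else 0) := by
  have hb : ∀ c ∈ pvColsB n nodes i, (-1 : Int) < c ∧ c < n := by
    intro c hcmem
    rcases (pvMemCols n nodes i c).mp hcmem with h | ⟨_, hC⟩
    · omega
    · obtain ⟨a1, a2, a3, a4⟩ := hC
      simp only at a1 a2 a3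
      omega
  have hpw : (pvColsB n nodes i).Pairwise (· < ·) := by
    unfold pvColsB
    exact PySem.List.sorted_ofList_pairwise_lt _
  have := pvGapFold n (pvColsB n nodes i) [] (-1) hpw hb (by omega)
  rw [show (-1 : Int) + 1 = 0 from by omega] at this
  simpa [pvGapRowB] using this

-- B's result as a nested map
lemma pvAltB (n : Int) (nodes : List (Int × Int)) :
    P_to_matrix_alt n nodes
      = (PySem.List.pyRange 0 n 1).map (fun i =>
          (PySem.List.pyRange 0 n 1).map (fun x => if x ∈ pvColsB n nodes i then 1 else 0)) := by
  unfold P_to_matrix_alt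
  rw [PySem.List.foldl_append_singleton_eq_map]
  rw [List.nil_append]
  apply List.map_congr_left
  intro i hi
  have hib := PySem.List.mem_pyRange_one.mp hi
  exact pvGapRow_eq n nodes i hib.1 hib.2

lemma pvAltB_getElem (n : Int) (nodes : List (Int × Int)) (i j : Nat)
    (hi' : i < (P_to_matrix_alt n nodes).length) (hj' : j < (P_to_matrix_alt n nodes)[i].length) :
    (P_to_matrix_alt n nodes)[i][j] = if ((j : Int)) ∈ pvColsB n nodes ((i : Int)) then 1 else 0 := by
  simp only [pvAltB, List.getElem_map, PySem.List.getElem_pyRange_one, zero_add]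

-- the two matrices agree cell by cell, hence are equal
lemma pvEquiv (n : Int) (nodes : List (Int × Int)) :
    P_to_matrix n nodes = P_to_matrix_alt n nodes := by
  obtain ⟨a1, a2, a3⟩ := P_to_matrix_get2 n nodes
  have hlen : (PySem.List.pyRange 0 n 1).length = n.toNat := by
    rw [PySem.List.length_pyRange_one]; congr 1; omega
  have bl : (P_to_matrix_alt n nodes).length = n.toNat := by
    rw [pvAltB, List.length_map, hlen]
  apply List.ext_getElem (by rw [a1, bl])
  intro i hi hi'
  have hiN : i < n.toNat := by rwa [a1] at hi
  have hrowA : (P_to_matrix n nodes)[i].length = n.toNat := a2 _ (List.getElem_mem _)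
  have hrowB : (P_to_matrix_alt n nodes)[i].length = n.toNat := by
    simp only [pvAltB, List.getElem_map, List.length_map]
    exact hlen
  apply List.ext_getElem (by rw [hrowA, hrowB])
  intro j hj hj'
  have hjN : j < n.toNat := by rwa [hrowA] at hj
  have eA : pvGet2 (P_to_matrix n nodes) i j = (P_to_matrix n nodes)[i][j] := by
    unfold pvGet2; rw [List.getD_eq_getElem _ _ hi, List.getD_eq_getElem _ _ hj]
  rw [← eA, a3 i j, pvAltB_getElem n nodes i j hi' hj']
  have hmc := pvMemCols n nodes (i : Int) (j : Int)
  by_cases hij : i = j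
  · have hin : ((j : Int)) ∈ pvColsB n nodes (i : Int) := hmc.mpr (Or.inl (by omega))
    subst hij
    simp [hjN, hin]
  · by_cases hm : ((i : Int), (j : Int)) ∈ nodes ∧ pvC n ((i : Int), (j : Int))
    · have hin : ((j : Int)) ∈ pvColsB n nodes (i : Int) := hmc.mpr (Or.inr hm)
      simp [hij, hm, hin]
    · have hout : ¬ ((j : Int)) ∈ pvColsB n nodes (i : Int) := by
        intro h
        rcases hmc.mp h with h1 | h1
        · exact hij (by omega)
        · exact hm h1
      simp [hij, hm, hout]

-- ===== VERDICT (by name: the statement is the Claim_ definition above) =====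
theorem P_to_matrix_spec : Claim_equal_P_to_matrix := by
  intro n nodes _
  unfold Spec_P_to_matrix
  exact pvEquiv n nodes
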